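-- pv_equiv track=rewrite | github.com/keithpatton/brain-sync | src/brain_sync/regen/topology.py | compute_waves
-- ===== SOURCE A (Python) =====
-- def parent_path(path: str) -> str:
--     """Return the parent of a knowledge path, or "" for root-level paths."""
--     if not path:
--         return ""
--     parts = path.rsplit("/", 1)
--     return parts[0] if len(parts) > 1 else ""
--
-- def compute_waves(paths: list[str]) -> list[list[str]]:
--     """Compute depth-ordered waves from leaf paths including all ancestors."""
--     if not paths:
--         return []
--
--     by_depth: dict[int, set[str]] = {}
--     for path in paths:
--         current = path
--         while True:
--             depth = 0 if not current else len(current.split("/"))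
--             by_depth.setdefault(depth, set()).add(current)
--             if not current:
--                 break
--             current = parent_path(current)
--
--     return [sorted(by_depth[depth]) for depth in sorted(by_depth, reverse=True)]
-- ===== SOURCE B (Python) =====
-- def compute_waves(paths: list[str]) -> list[list[str]]:
--     """Compute depth-ordered waves from leaf paths including all ancestors.
--
--     Two phases: first collect every node (each path, the root "", and each
--     prefix of a path cut just before a "/"); then group the nodes by depth
--     and emit the groups deepest-first, each sorted.
--     """
--     nodes: set[str] = set()
--     for p in paths:
--         nodes.add("")
--         nodes.add(p)
--         for i, ch in enumerate(p):
--             if ch == "/":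
--                 nodes.add(p[:i])
--
--     by_depth: dict[int, list[str]] = {}
--     for n in nodes:
--         d = len(n.split("/")) if n else 0
--         by_depth.setdefault(d, []).append(n)
--
--     return [sorted(group) for _, group in sorted(by_depth.items(), key=lambda kv: -kv[0])]
-- ===== Notes on version B (the rewrite author's own statement) =====
-- stated objective: alternative
-- what changed: B replaces A's fused parent-walk (repeated rsplit up the tree, inserting into per-depth sets on the way) by two separate phases: it first collects all nodes directly as the slash-cut prefixes of each path (p[:i] at every '/', plus p and the root), then groups the flat node set by depth in a second pass and emits the groups by sorting the dict items on descending depth.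
import Mathlib
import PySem

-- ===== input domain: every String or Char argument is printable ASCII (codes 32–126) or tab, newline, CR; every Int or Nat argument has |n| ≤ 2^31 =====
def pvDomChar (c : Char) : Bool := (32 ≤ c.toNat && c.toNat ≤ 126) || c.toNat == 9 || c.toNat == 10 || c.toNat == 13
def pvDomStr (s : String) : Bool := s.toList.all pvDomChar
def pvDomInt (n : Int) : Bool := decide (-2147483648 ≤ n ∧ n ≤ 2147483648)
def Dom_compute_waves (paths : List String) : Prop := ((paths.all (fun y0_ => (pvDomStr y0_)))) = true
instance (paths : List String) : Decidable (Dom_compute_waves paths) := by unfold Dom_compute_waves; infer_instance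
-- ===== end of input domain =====

-- B collects the ancestor set as slash-cut prefixes in one phase and groups by depth in a second,
-- instead of A's fused parent-walk; alternative decomposition, same asymptotic cost.

-- ===== PORT A =====

-- hand port of path.rsplit("/", 1): some (before, after) split at the LAST '/', none when no '/'
def lastSlashSplit : List Char → Option (List Char × List Char)
  | [] => none
  | c :: rest =>
    match lastSlashSplit rest with
    | some (a, b) => some (c :: a, b)
    | none => if c = '/' then some ([], rest) else none

theorem lastSlashSplit_spec :
    ∀ (cs : List Char),
      (∀ a b, lastSlashSplit cs = some (a, b) → cs = a ++ '/' :: b ∧ '/' ∉ b) ∧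
      (lastSlashSplit cs = none → '/' ∉ cs) := by
  intro cs
  induction cs with
  | nil => simp [lastSlashSplit]
  | cons c rest ih =>
    constructor
    · intro a b h
      simp only [lastSlashSplit] at h
      cases hr : lastSlashSplit rest with
      | some p =>
        obtain ⟨a', b'⟩ := p
        rw [hr] at h
        have h' : some (c :: a', b') = some (a, b) := h
        injection h' with h''
        have h1 : a = c :: a' := (Prod.ext_iff.mp h'').1.symm
        have h2 : b = b' := (Prod.ext_iff.mp h'').2.symm
        subst h1; subst h2
        obtain ⟨hra, hrb⟩ := ih.1 a' b hr
        exact ⟨by rw [hra]; simp, hrb⟩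
      | none =>
        rw [hr] at h
        by_cases hc : c = '/'
        · rw [if_pos hc] at h
          have h' : some (([] : List Char), rest) = some (a, b) := h
          injection h' with h''
          have h1 : a = [] := (Prod.ext_iff.mp h'').1.symm
          have h2 : b = rest := (Prod.ext_iff.mp h'').2.symm
          subst h1; subst h2
          exact ⟨by simp [hc], ih.2 hr⟩
        · simp [hc] at h
    · intro h
      simp only [lastSlashSplit] at h
      cases hr : lastSlashSplit rest with
      | some p => rw [hr] at h; cases h
      | none =>
        rw [hr] at h
        by_cases hc : c = '/'
        · simp [hc] at h
        · intro hmem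
          rcases List.mem_cons.mp hmem with h1 | h2
          · exact hc h1.symm
          · exact ih.2 hr h2

-- port of parent_path (A's helper)
def parent_path (path : String) : String :=
  if path = "" then ""
  else
    match lastSlashSplit path.toList with
    | some (a, _) => String.ofList a   -- rsplit found '/': parts = [a, b], return parts[0]
    | none => ""                       -- no '/': len(parts) == 1

theorem parent_path_length_lt (s : String) (h : s ≠ "") :
    (parent_path s).toList.length < s.toList.length := by
  unfold parent_path
  simp only [h, if_false]
  cases hr : lastSlashSplit s.toList with
  | some p =>
    obtain ⟨a, b⟩ := p
    obtain ⟨heq, -⟩ := (lastSlashSplit_spec s.toList).1 a b hr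
    simp only [String.toList_ofList, heq, List.length_append, List.length_cons]
    omega
  | none =>
    have : s.toList ≠ [] := by
      intro hnil; exact h (String.toList_eq_nil_iff.mp hnil)
    simp only [String.toList_empty]
    cases hs : s.toList with
    | nil => exact absurd hs this
    | cons x t => simp

-- depth = 0 if not current else len(current.split("/"))  (split ported via PySem.Chars.splitOn)
def pvDepthA (s : String) : Int :=
  if s = "" then 0 else ((PySem.Chars.splitOn s.toList ['/']).length : Int)

-- the while-loop of A: walk current up to the root, inserting into by_depth
def waveLoopA (d : PySem.Dict Int (PySem.Set String)) (current : String) :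
    PySem.Dict Int (PySem.Set String) :=
  let d' := d.modify (pvDepthA current) PySem.Set.empty (fun s => PySem.Set.add s current)
  if h : current = "" then d'
  else waveLoopA d' (parent_path current)
termination_by current.toList.length
decreasing_by exact parent_path_length_lt current h

def compute_waves (paths : List String) : List (List String) :=
  if paths = [] then []
  else
    let byDepth := paths.foldl waveLoopA PySem.Dict.empty
    -- by_depth[depth] : the key is always present, so getD is exact here
    (PySem.List.sorted byDepth.keys (fun k => k) true).map
      (fun dep => PySem.List.sorted (byDepth.getD dep PySem.Set.empty) (fun s => s) false)

-- ===== PORT B =====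

def pvDepthB (n : String) : Int :=
  if n = "" then 0 else ((PySem.Chars.splitOn n.toList ['/']).length : Int)

def compute_waves_alt (paths : List String) : List (List String) :=
  let nodes : PySem.Set String :=
    paths.foldl (fun s p =>
      (PySem.List.enumerate p.toList).foldl
        (fun s ic => if ic.2 = '/' then PySem.Set.add s (PySem.Str.slice p none (some ic.1)) else s)
        (PySem.Set.add (PySem.Set.add s "") p))
      PySem.Set.empty
  let byDepth : PySem.Dict Int (List String) :=
    nodes.foldl (fun d n => d.modify (pvDepthB n) [] (fun g => g ++ [n])) PySem.Dict.empty
  (PySem.List.sorted byDepth.items (fun kv => -kv.1) false).map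
    (fun kv => PySem.List.sorted kv.2 (fun s => s) false)

-- ===== PRECONDITION & SPEC =====
def Spec_compute_waves (paths : List String) (out : List (List String)) : Prop :=
  out = compute_waves_alt paths
instance (paths : List String) (out : List (List String)) : Decidable (Spec_compute_waves paths out) := by
  unfold Spec_compute_waves; infer_instance

-- ===== CLAIM (what is proved, stated in full; the proofs are below) =====
def Claim_equal_compute_waves : Prop :=
  ∀ (paths : List String), Dom_compute_waves paths → Spec_compute_waves paths (compute_waves paths)

-- ===== LEMMAS AND PROOFS =====

theorem depthB_eq_depthA : pvDepthB = pvDepthA := rfl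

-- the list of nodes A's while-loop visits starting at s
def chainA (s : String) : List String :=
  if h : s = "" then [s]
  else s :: chainA (parent_path s)
termination_by s.toList.length
decreasing_by exact parent_path_length_lt s h

def stepA (d : PySem.Dict Int (PySem.Set String)) (n : String) : PySem.Dict Int (PySem.Set String) :=
  d.modify (pvDepthA n) PySem.Set.empty (fun s => PySem.Set.add s n)

theorem chainA_empty : chainA "" = [""] := by rw [chainA]; simp

theorem chainA_of_ne (s : String) (h : s ≠ "") :
    chainA s = s :: chainA (parent_path s) := by rw [chainA]; simp [h]

theorem waveLoopA_eq_foldl (s : String) :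
    ∀ d, waveLoopA d s = (chainA s).foldl stepA d := by
  have H : ∀ (n : Nat) (s : String), s.toList.length ≤ n →
      ∀ d, waveLoopA d s = (chainA s).foldl stepA d := by
    intro n
    induction n with
    | zero =>
      intro s hs d
      have h : s = "" := String.toList_eq_nil_iff.mp
        (List.length_eq_zero_iff.mp (Nat.le_zero.mp hs))
      subst h
      rw [waveLoopA, chainA_empty]
      simp [stepA]
    | succ n ih =>
      intro s hs d
      by_cases h : s = ""
      · subst h
        rw [waveLoopA, chainA_empty]
        simp [stepA]
      · rw [waveLoopA, chainA_of_ne s h]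
        simp only [h, dif_neg, if_neg, List.foldl_cons]
        have hlt := parent_path_length_lt s h
        exact ih (parent_path s) (by omega) _
  exact H _ s le_rfl

-- membership in the chain: the root, the path itself, and every slash-cut prefix
def SlashPrefix (cs : List Char) (x : String) : Prop :=
  ∃ i, cs[i]? = some '/' ∧ x = String.ofList (cs.take i)

theorem slashPrefix_empty (x : String) : ¬ SlashPrefix [] x := by
  rintro ⟨i, hi, -⟩
  simp at hi

theorem chain_mem (s : String) (x : String) :
    x ∈ chainA s ↔ x = "" ∨ x = s ∨ SlashPrefix s.toList x := by
  have H : ∀ (n : Nat) (s : String), s.toList.length ≤ n → ∀ x,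
      x ∈ chainA s ↔ x = "" ∨ x = s ∨ SlashPrefix s.toList x := by
    intro n
    induction n with
    | zero =>
      intro s hs x
      have h : s = "" := String.toList_eq_nil_iff.mp
        (List.length_eq_zero_iff.mp (Nat.le_zero.mp hs))
      subst h
      rw [chainA_empty]
      simp only [List.mem_singleton, String.toList_empty]
      constructor
      · intro hx; exact Or.inl hx
      · rintro (hx | hx | hx)
        · exact hx
        · exact hx
        · exact absurd hx (slashPrefix_empty x)
    | succ n ih =>
      intro s hs x
      by_cases h : s = ""
      · subst h
        rw [chainA_empty]
        simp only [List.mem_singleton, String.toList_empty]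
        constructor
        · intro hx; exact Or.inl hx
        · rintro (hx | hx | hx)
          · exact hx
          · exact hx
          · exact absurd hx (slashPrefix_empty x)
      · rw [chainA_of_ne s h]
        have hlt := parent_path_length_lt s h
        rw [List.mem_cons, ih (parent_path s) (by omega) x]
        cases hr : lastSlashSplit s.toList with
        | none =>
          have hns := (lastSlashSplit_spec s.toList).2 hr
          have hp : parent_path s = "" := by
            unfold parent_path; simp [h, hr]
          rw [hp]
          simp only [String.toList_empty]
          constructor
          · rintro (hx | hx | hx | hx)
            · exact Or.inr (Or.inl hx)
            · exact Or.inl hx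
            · exact Or.inl hx
            · exact absurd hx (slashPrefix_empty x)
          · rintro (hx | hx | hx)
            · exact Or.inr (Or.inl hx)
            · exact Or.inl hx
            · obtain ⟨i, hi, -⟩ := hx
              exact absurd (List.mem_of_getElem? hi) hns
        | some p =>
          obtain ⟨a, b⟩ := p
          obtain ⟨heq, hnb⟩ := (lastSlashSplit_spec s.toList).1 a b hr
          have hp : parent_path s = String.ofList a := by
            unfold parent_path; simp [h, hr]
          rw [hp]
          have hta : (String.ofList a).toList = a := by simp
          rw [hta, heq]
          -- s.toList = a ++ '/' :: b, '/' ∉ b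
          constructor
          · rintro (hx | hx | hx | hx)
            · exact Or.inr (Or.inl hx)
            · exact Or.inl hx
            · -- x = ofList a : slash-cut prefix at i = a.length
              refine Or.inr (Or.inr ⟨a.length, ?_, ?_⟩)
              · rw [List.getElem?_append_right (le_refl a.length)]
                simp
              · rw [hx]
                congr 1
                rw [List.take_append_of_le_length (le_refl a.length)]
                simp
            · -- a slash-cut prefix of a is one of s
              obtain ⟨i, hi, hx'⟩ := hx
              have hia : i < a.length := by
                rcases List.getElem?_eq_some_iff.mp hi with ⟨hl, -⟩
                exact hl
              refine Or.inr (Or.inr ⟨i, ?_, ?_⟩)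
              · rw [List.getElem?_append_left hia]; exact hi
              · rw [hx']
                congr 1
                rw [List.take_append_of_le_length (Nat.le_of_lt hia)]
          · rintro (hx | hx | hx)
            · exact Or.inr (Or.inl hx)
            · exact Or.inl hx
            · obtain ⟨i, hi, hx'⟩ := hx
              by_cases hia : i < a.length
              · refine Or.inr (Or.inr (Or.inr ⟨i, ?_, ?_⟩))
                · rw [List.getElem?_append_left hia] at hi; exact hi
                · rw [List.take_append_of_le_length (Nat.le_of_lt hia)] at hx'; exact hx'
              · by_cases hieq : i = a.length
                · subst hieq
                  refine Or.inr (Or.inr (Or.inl ?_))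
                  rw [List.take_append_of_le_length (le_refl a.length)] at hx'
                  simpa using hx'
                · exfalso
                  have hib : a.length < i := by omega
                  rw [List.getElem?_append_right (by omega)] at hi
                  have hcons : ('/' :: b)[i - a.length]? = some '/' := hi
                  rw [List.getElem?_cons] at hcons
                  simp only [if_neg (by omega : ¬ i - a.length = 0)] at hcons
                  exact hnb (List.mem_of_getElem? hcons)
  exact H _ s le_rfl x

-- generic: getD of a grouping fold (modify with a key function)
theorem getD_foldl_modify_upd {ν : Type} (key : String → Int) (d0 : ν) (upd : ν → String → ν)
    (l : List String) (d : PySem.Dict Int ν) (k : Int) :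
    (l.foldl (fun d n => d.modify (key n) d0 (fun v => upd v n)) d).getD k d0
      = (l.filter (fun n => key n = k)).foldl upd (d.getD k d0) := by
  induction l generalizing d with
  | nil => rfl
  | cons n t ih =>
    simp only [List.foldl_cons, List.filter_cons, ih]
    by_cases hk : key n = k
    · simp [hk, PySem.Dict.getD_modify]
    · have hk' : ¬ k = key n := fun h => hk h.symm
      simp [PySem.Dict.getD_modify, hk', hk]

-- all nodes A's loops insert, in visit order
def nsA (paths : List String) : List String := paths.flatMap chainA

theorem foldl_waveLoopA (paths : List String) :
    ∀ d, paths.foldl waveLoopA d = (nsA paths).foldl stepA d := by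
  induction paths with
  | nil => intro d; rfl
  | cons p t ih =>
    intro d
    simp only [List.foldl_cons, nsA, List.flatMap_cons, List.foldl_append]
    rw [waveLoopA_eq_foldl p d, ih]
    rfl

theorem keysA_eq (l : List String) :
    ((l.foldl stepA PySem.Dict.empty).keys) = PySem.Set.ofList (l.map pvDepthA) := by
  have h := PySem.Dict.keys_foldl_modify_key l pvDepthA PySem.Set.empty
    (fun _ n => fun v => PySem.Set.add v n) (PySem.Dict.empty (κ := Int) (ν := PySem.Set String))
  simpa [PySem.Dict.keys_empty, PySem.Set.ofList_eq_foldl, PySem.Set.update, stepA] using h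

theorem getDA_eq (l : List String) (k : Int) :
    ((l.foldl stepA PySem.Dict.empty).getD k PySem.Set.empty)
      = PySem.Set.ofList (l.filter (fun n => decide (pvDepthA n = k))) := by
  have h := getD_foldl_modify_upd pvDepthA PySem.Set.empty PySem.Set.add l
    (PySem.Dict.empty (κ := Int) (ν := PySem.Set String)) k
  simpa [PySem.Dict.getD_empty, PySem.Set.ofList_eq_foldl, stepA] using h

-- B's phase-1 inner loop over one path
def collectB (s : PySem.Set String) (p : String) : PySem.Set String :=
  (PySem.List.enumerate p.toList).foldl
    (fun s ic => if ic.2 = '/' then PySem.Set.add s (PySem.Str.slice p none (some ic.1)) else s)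
    (PySem.Set.add (PySem.Set.add s "") p)

theorem collectB_eq_update (s : PySem.Set String) (p : String) :
    collectB s p = PySem.Set.update (PySem.Set.add (PySem.Set.add s "") p)
      (((PySem.List.enumerate p.toList).filter (fun ic => decide (ic.2 = '/'))).map
        (fun ic => PySem.Str.slice p none (some ic.1))) := by
  unfold collectB
  have h := PySem.List.foldl_ite_eq_foldl_filter (fun (ic : Int × Char) => ic.2 = '/')
    (fun s ic => PySem.Set.add s (PySem.Str.slice p none (some ic.1)))
    (PySem.List.enumerate p.toList) (PySem.Set.add (PySem.Set.add s "") p)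
  exact h.trans (by rw [PySem.Set.update, List.foldl_map])

theorem slice_eq_ofList_take (p : String) (k : Nat) :
    PySem.Str.slice p none (some (k : Int)) = String.ofList (p.toList.take k) := by
  have h : (PySem.Str.slice p none (some (k : Int))).toList = p.toList.take k := by
    rw [PySem.Str.toList_slice, PySem.Chars.slice_eq_listSlice,
      PySem.List.slice_to p.toList (by positivity)]
    simp
  rw [← h, String.ofList_toList]

theorem mem_slices_iff (p : String) (x : String) :
    (x ∈ ((PySem.List.enumerate p.toList).filter (fun ic => decide (ic.2 = '/'))).map
        (fun ic => PySem.Str.slice p none (some ic.1)))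
      ↔ SlashPrefix p.toList x := by
  simp only [List.mem_map, List.mem_filter, PySem.List.mem_enumerate_iff]
  constructor
  · rintro ⟨ic, ⟨⟨k, hk, rfl⟩, hc⟩, rfl⟩
    refine ⟨k, ?_, ?_⟩
    · rw [List.getElem?_eq_getElem hk]
      simpa using hc
    · simp only [zero_add]
      rw [show ((k : Int) : Int) = ((k : Nat) : Int) from rfl]
      exact slice_eq_ofList_take p k
  · rintro ⟨i, hi, rfl⟩
    obtain ⟨hl, hv⟩ := List.getElem?_eq_some_iff.mp hi
    refine ⟨((i : Int), p.toList[i]), ⟨⟨i, hl, by simp⟩, by simpa using hv⟩, ?_⟩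
    simpa using slice_eq_ofList_take p i

theorem mem_collectB (s : PySem.Set String) (p : String) (x : String) :
    x ∈ collectB s p ↔ x ∈ s ∨ x = "" ∨ x = p ∨ SlashPrefix p.toList x := by
  rw [collectB_eq_update, PySem.Set.mem_update, PySem.Set.mem_add, PySem.Set.mem_add,
    mem_slices_iff]
  tauto

theorem nodup_collectB (s : PySem.Set String) (p : String) (h : s.Nodup) :
    (collectB s p).Nodup := by
  rw [collectB_eq_update]
  exact PySem.Set.nodup_update _ _ (PySem.Set.nodup_add _ _ (PySem.Set.nodup_add _ _ h))

theorem mem_foldl_collectB (paths : List String) :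
    ∀ (s : PySem.Set String) (x : String),
      x ∈ paths.foldl collectB s ↔ x ∈ s ∨ ∃ p ∈ paths, x = "" ∨ x = p ∨ SlashPrefix p.toList x := by
  induction paths with
  | nil => intro s x; simp
  | cons p t ih =>
    intro s x
    simp only [List.foldl_cons, ih, mem_collectB, List.mem_cons]
    constructor
    · rintro ((hx | hx) | ⟨q, hq, hx⟩)
      · exact Or.inl hx
      · exact Or.inr ⟨p, Or.inl rfl, hx⟩
      · exact Or.inr ⟨q, Or.inr hq, hx⟩
    · rintro (hx | ⟨q, (rfl | hq), hx⟩)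
      · exact Or.inl (Or.inl hx)
      · exact Or.inl (Or.inr hx)
      · exact Or.inr ⟨q, hq, hx⟩

theorem nodup_foldl_collectB (paths : List String) :
    ∀ (s : PySem.Set String), s.Nodup → (paths.foldl collectB s).Nodup := by
  induction paths with
  | nil => intro s h; exact h
  | cons p t ih => intro s h; exact ih _ (nodup_collectB s p h)

def stepB (d : PySem.Dict Int (List String)) (n : String) : PySem.Dict Int (List String) :=
  d.modify (pvDepthB n) [] (fun g => g ++ [n])

theorem keysB_eq (l : List String) :
    ((l.foldl stepB PySem.Dict.empty).keys) = PySem.Set.ofList (l.map pvDepthB) := by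
  have h := PySem.Dict.keys_foldl_modify_key l pvDepthB ([] : List String)
    (fun _ n => fun g => g ++ [n]) (PySem.Dict.empty (κ := Int) (ν := List String))
  simpa [PySem.Dict.keys_empty, PySem.Set.ofList_eq_foldl, PySem.Set.update, stepB] using h

theorem getDB_eq (l : List String) (k : Int) :
    ((l.foldl stepB PySem.Dict.empty).getD k [])
      = l.filter (fun n => decide (pvDepthB n = k)) := by
  have h := getD_foldl_modify_upd pvDepthB ([] : List String) (fun g n => g ++ [n]) l
    (PySem.Dict.empty (κ := Int) (ν := List String)) k
  have h2 := PySem.List.foldl_append_singleton_eq_self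
    (l.filter (fun n => decide (pvDepthB n = k))) ([] : List String)
  simp only [PySem.Dict.getD_empty] at h
  rw [show (l.foldl (fun d n => d.modify (pvDepthB n) [] fun v => v ++ [n]) PySem.Dict.empty)
      = l.foldl stepB PySem.Dict.empty from rfl] at h
  rw [h, h2]
  simp

theorem nodup_keysB (l : List String) : ((l.foldl stepB PySem.Dict.empty).keys).Nodup := by
  rw [keysB_eq]; exact PySem.Set.nodup_ofList _

-- ===== VERDICT (by name: the statement is the Claim_ definition above) =====
theorem compute_waves_spec : Claim_equal_compute_waves := by
  unfold Claim_equal_compute_waves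
  intro paths _
  unfold Spec_compute_waves
  by_cases hp : paths = []
  · subst hp; rfl
  · -- names
    set N := nsA paths with hN
    have hMmem : ∀ x, x ∈ ([] : List String) ∨ (∃ p ∈ paths, x = "" ∨ x = p ∨ SlashPrefix p.toList x)
        ↔ x ∈ N := by
      intro x
      rw [hN]
      unfold nsA
      simp only [List.mem_flatMap, List.not_mem_nil, false_or]
      constructor
      · rintro ⟨p, hpmem, hx⟩; exact ⟨p, hpmem, (chain_mem p x).mpr hx⟩
      · rintro ⟨p, hpmem, hx⟩; exact ⟨p, hpmem, (chain_mem p x).mp hx⟩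
    set M := paths.foldl collectB ([] : PySem.Set String) with hM
    have hMN : ∀ x, x ∈ M ↔ x ∈ N := by
      intro x
      rw [hM, mem_foldl_collectB]
      rw [← hMmem x]
    have hMnd : M.Nodup := nodup_foldl_collectB paths [] List.nodup_nil
    -- unfold both programs (zeta / beta are definitional)
    unfold compute_waves compute_waves_alt
    rw [if_neg hp]
    show (PySem.List.sorted ((paths.foldl waveLoopA PySem.Dict.empty).keys) (fun k => k) true).map
          (fun dep => PySem.List.sorted
            ((paths.foldl waveLoopA PySem.Dict.empty).getD dep PySem.Set.empty) (fun s => s) false)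
        = (PySem.List.sorted ((M.foldl stepB PySem.Dict.empty).items) (fun kv => -kv.1) false).map
            (fun kv => PySem.List.sorted kv.2 (fun s => s) false)
    rw [foldl_waveLoopA paths PySem.Dict.empty, ← hN, keysA_eq]
    simp only [getDA_eq]
    -- canonical key list
    set SK := PySem.List.sorted (PySem.Set.ofList (N.map pvDepthA)) (fun k => k) true with hSK
    have hndB : ((M.foldl stepB PySem.Dict.empty).keys).Nodup := nodup_keysB M
    have hitems : (M.foldl stepB PySem.Dict.empty).items
        = ((M.foldl stepB PySem.Dict.empty).keys).map
            (fun k => (k, (M.foldl stepB PySem.Dict.empty).getD k [])) :=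
      PySem.Dict.items_eq_map_keys _ hndB []
    have hofPerm : (PySem.Set.ofList (N.map pvDepthA)).Perm (PySem.Set.ofList (M.map pvDepthB)) := by
      rw [List.perm_ext_iff_of_nodup (PySem.Set.nodup_ofList _) (PySem.Set.nodup_ofList _)]
      intro k
      rw [PySem.Set.mem_ofList, PySem.Set.mem_ofList, depthB_eq_depthA]
      simp only [List.mem_map]
      constructor
      · rintro ⟨x, hx, rfl⟩; exact ⟨x, (hMN x).mpr hx, rfl⟩
      · rintro ⟨x, hx, rfl⟩; exact ⟨x, (hMN x).mp hx, rfl⟩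
    have hKperm : SK.Perm (PySem.Set.ofList (M.map pvDepthB)) :=
      (PySem.List.sorted_perm _ _ _).trans hofPerm
    have hSKnd : SK.Nodup :=
      (PySem.List.sorted_perm _ _ _).nodup_iff.mpr (PySem.Set.nodup_ofList _)
    have hpairSK : SK.Pairwise (fun a b => (fun k => k) b ≤ (fun k => k) a) :=
      PySem.List.sorted_pairwise_rev _ _
    have hpairSK' : SK.Pairwise (fun a b : Int => b < a) :=
      (hpairSK.and hSKnd).imp (by rintro a b ⟨h1, h2⟩; have h1' : b ≤ a := h1; omega)
    have hsortedItems : PySem.List.sorted ((M.foldl stepB PySem.Dict.empty).items)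
          (fun kv => -kv.1) false
        = SK.map (fun k => (k, (M.foldl stepB PySem.Dict.empty).getD k [])) := by
      apply PySem.List.sorted_eq_of_perm_of_pairwise_lt
      · rw [hitems, keysB_eq]
        exact hKperm.map _
      · rw [List.pairwise_map]
        exact hpairSK'.imp (by intro a b h; simp only; omega)
    rw [hsortedItems, List.map_map]
    apply List.map_congr_left
    intro k _
    simp only [Function.comp_apply]
    rw [getDB_eq M k]
    apply PySem.List.sorted_eq_sorted_of_perm _ _ (fun s => s) (fun a b h => h)
    rw [List.perm_ext_iff_of_nodup (PySem.Set.nodup_ofList _) (List.Nodup.filter _ hMnd)]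
    intro x
    rw [PySem.Set.mem_ofList, List.mem_filter, List.mem_filter, depthB_eq_depthA]
    constructor
    · rintro ⟨hx, hdx⟩; exact ⟨(hMN x).mpr hx, hdx⟩
    · rintro ⟨hx, hdx⟩; exact ⟨(hMN x).mp hx, hdx⟩
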